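-- pv_equiv track=rewrite | github.com/TJWeiten/Advent-of-Code-2020 | Day 6/S11-12.py | process_customs_sheets_s11
-- ===== SOURCE A (Python) =====
-- def process_customs_sheets_s11(input_list):
--     group_answers = []
--     filled_customs_fields = []
--     for person in input_list:
--         if person == "":
--             filled_customs_fields = sorted(set(filled_customs_fields))
--             group_answers.append(filled_customs_fields)
--             filled_customs_fields = []
--         else:
--             filled_customs_fields += list(person)
--
--     return group_answers
-- ===== SOURCE B (Python) =====
-- def process_customs_sheets_s11(input_list):
--     # Delimiter-index walk: for each blank line at index i, the group is the
--     # slice input_list[prev:i]; the unterminated tail group is naturally dropped.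
--     result = []
--     prev = 0
--     for i, person in enumerate(input_list):
--         if person == "":
--             chars = []
--             for p in input_list[prev:i]:
--                 chars += list(p)
--             result.append(sorted(set(chars)))
--             prev = i + 1
--     return result
-- ===== Notes on version B (the rewrite author's own statement) =====
-- stated objective: alternative
-- what changed: B replaces A's running per-group character accumulator with a delimiter-index walk: for each blank line at index i it builds the group directly from the slice input_list[prev:i] and advances the cursor prev, naturally dropping the unterminated final group.
import Mathlib
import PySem

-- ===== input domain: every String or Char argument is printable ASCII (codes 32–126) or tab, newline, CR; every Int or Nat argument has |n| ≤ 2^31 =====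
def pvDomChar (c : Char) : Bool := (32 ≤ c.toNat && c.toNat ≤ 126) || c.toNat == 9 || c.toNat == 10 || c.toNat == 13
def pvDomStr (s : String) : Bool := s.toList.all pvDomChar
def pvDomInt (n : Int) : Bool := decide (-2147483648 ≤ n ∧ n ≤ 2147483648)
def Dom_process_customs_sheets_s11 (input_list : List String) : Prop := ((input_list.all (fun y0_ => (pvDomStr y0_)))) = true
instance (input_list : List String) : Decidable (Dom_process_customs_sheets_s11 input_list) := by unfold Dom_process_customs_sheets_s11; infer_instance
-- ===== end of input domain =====

-- B walks the blank-line (delimiter) indices with a running 'prev' cursor and builds each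
-- group from the slice input_list[prev:i], instead of A's running accumulator; objective:
-- alternative decomposition, same cost.

-- list(person): a Python str iterates as 1-char strings
def pvChars (p : String) : List String := p.toList.map (fun c => String.ofList [c])

-- sorted(set(l))
def pvAns (l : List String) : List String :=
  PySem.List.sorted (PySem.Set.ofList l) (fun x => x) false

-- ===== PORT A =====
def process_customs_sheets_s11 (input_list : List String) : List (List String) :=
  (input_list.foldl
    (fun (st : List (List String) × List String) person =>
      if person = "" then (st.1 ++ [pvAns st.2], ([] : List String))
      else (st.1, st.2 ++ pvChars person))
    ([], [])).1

-- ===== PORT B =====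
def process_customs_sheets_s11_alt (input_list : List String) : List (List String) :=
  ((PySem.List.enumerate input_list 0).foldl
    (fun (st : List (List String) × Int) ip =>
      if ip.2 = "" then
        (st.1 ++ [pvAns ((PySem.List.slice input_list (some st.2) (some ip.1)).foldl
                            (fun acc p => acc ++ pvChars p) [])],
         ip.1 + 1)
      else st)
    ([], 0)).1

-- ===== PRECONDITION & SPEC =====
def Spec_process_customs_sheets_s11 (input_list : List String) (out : List (List String)) : Prop := out = process_customs_sheets_s11_alt input_list
instance (input_list : List String) (out : List (List String)) : Decidable (Spec_process_customs_sheets_s11 input_list out) := by unfold Spec_process_customs_sheets_s11; infer_instance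

-- ===== CLAIM (what is proved, stated in full; the proofs are below) =====
def Claim_equal_process_customs_sheets_s11 : Prop := ∀ (input_list : List String), Dom_process_customs_sheets_s11 input_list → Spec_process_customs_sheets_s11 input_list (process_customs_sheets_s11 input_list)

-- ===== LEMMAS AND PROOFS =====

-- The two loops agree: when the B loop is at absolute index k with cursor prev,
-- A's running accumulator is exactly the flattened characters of full[prev:k].
lemma pv_loop_eq (full : List String) :
    ∀ (xs : List String) (k prev : Nat) (acc : List (List String)),
      prev ≤ k → xs = full.drop k →
      ((PySem.List.enumerate xs (k : Int)).foldl
        (fun (st : List (List String) × Int) ip =>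
          if ip.2 = "" then
            (st.1 ++ [pvAns ((PySem.List.slice full (some st.2) (some ip.1)).foldl
                                (fun acc p => acc ++ pvChars p) [])],
             ip.1 + 1)
          else st)
        (acc, (prev : Int))).1
      =
      (xs.foldl
        (fun (st : List (List String) × List String) person =>
          if person = "" then (st.1 ++ [pvAns st.2], ([] : List String))
          else (st.1, st.2 ++ pvChars person))
        (acc, ((full.drop prev).take (k - prev)).flatMap pvChars)).1 := by
  intro xs
  induction xs with
  | nil => intro k prev acc _ _; simp [PySem.List.enumerate]
  | cons p xs ih =>
    intro k prev acc hpk hdrop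
    have hk : k < full.length := by
      by_contra h
      have : full.drop k = [] := List.drop_eq_nil_of_le (by omega)
      rw [this] at hdrop; simp at hdrop
    have hget : full[k]? = some p := by
      have := congrArg (fun l => l[0]?) hdrop
      simpa [List.getElem?_drop] using this.symm
    have hxs : xs = full.drop (k + 1) := by
      have := congrArg (List.drop 1) hdrop
      simpa [List.drop_drop, Nat.add_comm 1 k] using this
    rw [PySem.List.enumerate_cons]
    by_cases hp : p = ""
    · simp only [List.foldl_cons, hp]
      have hslice : PySem.List.slice full (some (prev : Int)) (some (k : Int))
          = (full.drop prev).take (k - prev) := PySem.List.slice_natCast full prev k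
      have hflat : ∀ (l : List String),
          l.foldl (fun acc p => acc ++ pvChars p) [] = l.flatMap pvChars := by
        intro l
        simpa using PySem.List.foldl_append_eq_flatMap pvChars l []
      rw [hslice, hflat]
      have hcast : ((k : Int) + 1) = ((k + 1 : Nat) : Int) := by push_cast; ring
      rw [hcast]
      have := ih (k + 1) (k + 1) (acc ++ [pvAns (((full.drop prev).take (k - prev)).flatMap pvChars)]) (le_refl _) hxs
      simpa using this
    · simp only [List.foldl_cons, hp]
      have hstep : ((full.drop prev).take (k + 1 - prev)).flatMap pvChars
          = ((full.drop prev).take (k - prev)).flatMap pvChars ++ pvChars p := by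
        have hidx : (full.drop prev)[k - prev]? = some p := by
          rw [List.getElem?_drop]
          have : prev + (k - prev) = k := by omega
          rw [this]; exact hget
        have htake : (full.drop prev).take (k + 1 - prev)
            = (full.drop prev).take (k - prev) ++ [p] := by
          have h1 : k + 1 - prev = (k - prev) + 1 := by omega
          rw [h1, List.take_add_one, hidx]
          rfl
        rw [htake, List.flatMap_append]
        simp [pvChars]
      have := ih (k + 1) prev acc (by omega) hxs
      rw [hstep] at this
      have hcast : ((k : Int) + 1) = ((k + 1 : Nat) : Int) := by push_cast; ring
      rw [hcast]
      exact this

-- ===== VERDICT (by name: the statement is the Claim_ definition above) =====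
theorem process_customs_sheets_s11_spec : Claim_equal_process_customs_sheets_s11 := by
  intro input_list _
  unfold Spec_process_customs_sheets_s11 process_customs_sheets_s11 process_customs_sheets_s11_alt
  have := pv_loop_eq input_list input_list 0 0 [] (le_refl _) (by simp)
  simpa using this.symm
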